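-- pv_equiv track=rewrite | github.com/Andross78/Kaizer | for_cykly.py | for_38
-- ===== SOURCE A (Python) =====
-- def for_38(n):
--     result = 0
--     k = n
--     for i in range(1, n+1):
--         p = 1
--         for j in range(k):
--             p *= i
--         result += p
--         k -= 1
--     return result
-- ===== SOURCE B (Python) =====
-- def for_38(n):
--     # Column-wise (transposed) evaluation: keep one running power per base and
--     # raise all of them together one exponent step per round, harvesting the
--     # base whose target exponent is complete (the largest remaining one).
--     total = 0
--     powers = list(range(n + 1))          # powers[i] == i ** 1
--     for _ in range(1, n + 1):
--         total += powers[-1]              # base n+1-t has reached exponent t = n-(base)+1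
--         powers = [i * p for i, p in enumerate(powers[:-1])]
--     return total
-- ===== Notes on version B (the rewrite author's own statement) =====
-- stated objective: alternative
-- what changed: Replaces A's row-wise nested loop (each power recomputed from scratch) with a column-wise sweep that maintains an array of simultaneous running powers, raising all bases one exponent step per round and harvesting the finished (largest) base each round.
import Mathlib
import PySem

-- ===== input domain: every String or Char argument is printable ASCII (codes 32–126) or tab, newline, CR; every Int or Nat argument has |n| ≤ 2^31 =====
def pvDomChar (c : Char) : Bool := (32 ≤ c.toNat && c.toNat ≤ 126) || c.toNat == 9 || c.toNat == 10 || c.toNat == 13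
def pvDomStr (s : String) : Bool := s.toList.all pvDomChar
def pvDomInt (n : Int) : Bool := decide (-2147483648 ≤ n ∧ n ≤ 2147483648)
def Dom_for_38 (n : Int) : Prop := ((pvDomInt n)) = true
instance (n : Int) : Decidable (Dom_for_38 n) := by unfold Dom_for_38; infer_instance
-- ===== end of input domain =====

-- B replaces A's row-wise nested loop by a column-wise sweep over an array of
-- simultaneous running powers (same cost class, different algorithm); same value for every n.

-- ===== PORT A =====
def for_38 (n : Int) : Int :=
  ((PySem.List.pyRange 1 (n + 1) 1).foldl
    (fun (st : Int × Int) i =>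
      let p := (PySem.List.pyRange 0 st.2 1).foldl (fun p _ => p * i) 1
      (st.1 + p, st.2 - 1))
    (0, n)).1

-- ===== PORT B =====
-- powers[-1] is ported as pyGetD … (-1) 0: inside the loop the list is never
-- empty (length n+1-t+1 ≥ 2 at round t ≤ n), so the default is never taken.
def for_38_alt (n : Int) : Int :=
  ((PySem.List.pyRange 1 (n + 1) 1).foldl
    (fun (st : Int × List Int) _ =>
      (st.1 + PySem.List.pyGetD st.2 (-1) 0,
       (PySem.List.enumerate (PySem.List.slice st.2 none (some (-1))) 0).map
         (fun ip => ip.1 * ip.2)))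
    (0, PySem.List.pyRange 0 (n + 1) 1)).1

-- ===== PRECONDITION & SPEC =====
def Spec_for_38 (n : Int) (out : Int) : Prop := out = for_38_alt n
instance (n : Int) (out : Int) : Decidable (Spec_for_38 n out) := by unfold Spec_for_38; infer_instance

-- ===== CLAIM (what is proved, stated in full; the proofs are below) =====
def Claim_equal_for_38 : Prop := ∀ (n : Int), Dom_for_38 n → Spec_for_38 n (for_38 n)

-- ===== LEMMAS AND PROOFS =====

-- The array of running powers i^t for i = 0 .. m-1.
def pows (t m : Nat) : List Int := (List.range m).map (fun i => (i : Int) ^ t)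

-- The common value: Ssum k t = k^t + (k-1)^(t+1) + … + 1^(t+k-1).
def Ssum : Nat → Nat → Int
  | 0, _ => 0
  | k + 1, t => ((k : Int) + 1) ^ t + Ssum k (t + 1)

lemma pows_succ (t m : Nat) : pows t (m + 1) = pows t m ++ [(m : Int) ^ t] := by
  simp [pows, List.range_succ]

lemma enumerate_append {α : Type} (xs ys : List α) (s : Int) :
    PySem.List.enumerate (xs ++ ys) s
      = PySem.List.enumerate xs s ++ PySem.List.enumerate ys (s + xs.length) := by
  induction xs generalizing s with
  | nil => simp [PySem.List.enumerate_nil]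
  | cons x xs ih =>
      simp [PySem.List.enumerate_cons, ih]
      ring_nf

-- Repeated multiplication p *= i over any list is p * i^length.
lemma foldl_mul_const (i : Int) : ∀ (l : List Int) (p : Int),
    l.foldl (fun p _ => p * i) p = p * i ^ l.length := by
  intro l
  induction l with
  | nil => intro p; simp
  | cons x xs ih =>
      intro p
      simp [List.foldl, ih, pow_succ]
      ring

-- The inner loop of A computes i ^ k.toNat (empty range for k ≤ 0 gives 1 = i^0).
lemma inner_pow (i k : Int) :
    (PySem.List.pyRange 0 k 1).foldl (fun p _ => p * i) 1 = i ^ k.toNat := by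
  rw [foldl_mul_const, PySem.List.length_pyRange_one]
  simp

-- A's loop invariant: the fold over pyRange a (a+m) with decrementing counter k
-- sums i ^ (k - (i - a)).toNat.
lemma loop_lemma : ∀ (m : Nat) (a r k : Int),
    ((PySem.List.pyRange a (a + m) 1).foldl
      (fun (st : Int × Int) i =>
        let p := (PySem.List.pyRange 0 st.2 1).foldl (fun p _ => p * i) 1
        (st.1 + p, st.2 - 1)) (r, k)).1
    = r + ((PySem.List.pyRange a (a + m) 1).map (fun i => i ^ (k - (i - a)).toNat)).sum := by
  intro m
  induction m with
  | zero =>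
      intro a r k
      simp
  | succ m ih =>
      intro a r k
      have hcons : PySem.List.pyRange a (a + (m + 1 : Nat)) 1
          = a :: PySem.List.pyRange (a + 1) (a + (m + 1 : Nat)) 1 :=
        PySem.List.pyRange_one_cons (by push_cast; omega)
      have hshift : a + ((m : Int) + 1) = (a + 1) + m := by ring
      rw [hcons]
      simp only [List.foldl, List.map, List.sum_cons]
      push_cast
      rw [hshift, ih (a + 1) (r + _) (k - 1)]
      have hmap : (PySem.List.pyRange (a + 1) ((a + 1) + m) 1).map
            (fun i => i ^ (k - 1 - (i - (a + 1))).toNat)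
          = (PySem.List.pyRange (a + 1) ((a + 1) + m) 1).map
            (fun i => i ^ (k - (i - a)).toNat) := by
        apply List.map_congr_left
        intro i _
        congr 1
        omega
      rw [inner_pow, hmap]
      have hz : (k - (a - a)).toNat = k.toNat := by omega
      rw [hz]
      ring

-- A's per-row sum, read back-to-front, is Ssum.
lemma sum_eq_Ssum : ∀ (k t : Nat),
    ((PySem.List.pyRange 1 ((k : Int) + 1) 1).map
      (fun i => i ^ ((t : Int) + (k : Int) - i).toNat)).sum = Ssum k t := by
  intro k
  induction k with
  | zero => intro t; simp [Ssum]
  | succ k ih =>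
      intro t
      have hsnoc : PySem.List.pyRange 1 ((k : Int) + 1 + 1) 1
          = PySem.List.pyRange 1 ((k : Int) + 1) 1 ++ [(k : Int) + 1] :=
        PySem.List.pyRange_one_succ_right (by omega)
      push_cast
      rw [hsnoc, List.map_append, List.sum_append]
      have hmap : (PySem.List.pyRange 1 ((k : Int) + 1) 1).map
            (fun i => i ^ ((t : Int) + ((k : Int) + 1) - i).toNat)
          = (PySem.List.pyRange 1 ((k : Int) + 1) 1).map
            (fun i => i ^ (((t : Nat) + 1 : Int) + (k : Int) - i).toNat) := by
        apply List.map_congr_left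
        intro i _
        congr 1
        omega
      rw [hmap]
      have hih := ih (t + 1)
      push_cast at hih
      rw [hih]
      have he : ((t : Int) + ((k : Int) + 1) - ((k : Int) + 1)).toNat = t := by omega
      simp only [List.map_cons, List.map_nil, List.sum_cons, List.sum_nil, add_zero]
      rw [he, Ssum]
      ring

-- One column step of B: harvest the last running power and raise the rest.
lemma enum_mul_pows : ∀ (t m : Nat),
    (PySem.List.enumerate (pows t m) 0).map (fun ip => ip.1 * ip.2) = pows (t + 1) m := by
  intro t m
  induction m with
  | zero => simp [pows, PySem.List.enumerate_nil]
  | succ m ih =>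
      rw [pows_succ, enumerate_append, List.map_append, ih, pows_succ]
      simp [pows, PySem.List.enumerate_cons, PySem.List.enumerate_nil, pow_succ]
      ring

lemma last_pows (t m : Nat) :
    PySem.List.pyGetD (pows t (m + 1)) (-1) 0 = (m : Int) ^ t := by
  rw [pows_succ]
  exact PySem.List.pyGetD_neg_one_append_singleton (pows t m) ((m : Int) ^ t) 0

lemma dropLast_pows (t m : Nat) : (pows t (m + 1)).dropLast = pows t m := by
  rw [pows_succ]
  simp

-- B's loop invariant: the fold (which ignores the loop variable) over any list L,
-- started with the array of first powers of 0 .. L.length, sums Ssum L.length t.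
lemma B_loop : ∀ (L : List Int) (t : Nat) (T : Int),
    (L.foldl
      (fun (st : Int × List Int) _ =>
        (st.1 + PySem.List.pyGetD st.2 (-1) 0,
         (PySem.List.enumerate (PySem.List.slice st.2 none (some (-1))) 0).map
           (fun ip => ip.1 * ip.2)))
      (T, pows t (L.length + 1))).1 = T + Ssum L.length t := by
  intro L
  induction L with
  | nil => intro t T; simp [Ssum]
  | cons x l ih =>
      intro t T
      simp only [List.foldl, List.length_cons]
      rw [PySem.List.slice_to_neg_one, dropLast_pows, enum_mul_pows, last_pows, ih (t + 1)]
      rw [Ssum]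
      push_cast
      ring

lemma pyRange_zero_succ (n : Int) (h : 0 ≤ n) :
    PySem.List.pyRange 0 (n + 1) 1 = pows 1 (n.toNat + 1) := by
  rw [PySem.List.pyRange_one]
  have hl : (n + 1 - 0).toNat = n.toNat + 1 := by omega
  rw [hl]
  unfold pows
  simp [List.map_eq_flatMap]

theorem for_38_spec : Claim_equal_for_38 := by
  intro n _
  unfold Spec_for_38 for_38 for_38_alt
  by_cases h : 0 ≤ n
  · -- A's side: loop invariant, then read the row sums back-to-front as Ssum n 1.
    have hm : n + 1 = 1 + (n.toNat : Int) := by omega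
    rw [hm, loop_lemma n.toNat 1 0 n]
    have hA : ((PySem.List.pyRange 1 (1 + (n.toNat : Int)) 1).map
          (fun i => i ^ (n - (i - 1)).toNat)).sum = Ssum n.toNat 1 := by
      have hb : (1 : Int) + (n.toNat : Int) = (n.toNat : Int) + 1 := by ring
      rw [hb]
      have hmap : (PySem.List.pyRange 1 ((n.toNat : Int) + 1) 1).map
            (fun i => i ^ (n - (i - 1)).toNat)
          = (PySem.List.pyRange 1 ((n.toNat : Int) + 1) 1).map
            (fun i => i ^ (((1 : Nat) : Int) + (n.toNat : Int) - i).toNat) := by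
        apply List.map_congr_left
        intro i _
        congr 1
        omega
      rw [hmap]
      exact sum_eq_Ssum n.toNat 1
    rw [zero_add, hA]
    -- B's side: column invariant.
    have hL : (PySem.List.pyRange 1 (1 + (n.toNat : Int)) 1).length = n.toNat := by
      rw [PySem.List.length_pyRange_one]; omega
    have hinit : PySem.List.pyRange 0 (1 + (n.toNat : Int)) 1
        = pows 1 ((PySem.List.pyRange 1 (1 + (n.toNat : Int)) 1).length + 1) := by
      rw [hL]
      have hb : (1 : Int) + (n.toNat : Int) = (n.toNat : Int) + 1 := by ring
      rw [hb]
      exact pyRange_zero_succ (n.toNat : Int) (by positivity)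
    rw [hinit, B_loop, zero_add, hL]
  · simp [PySem.List.pyRange_one_eq_nil (by omega : n + 1 ≤ 1)]
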